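-- pv_equiv track=rewrite | github.com/nimrod46/Computer-Science-Introduction | pre_test_practice/test2.py | get_one_number
-- ===== SOURCE A (Python) =====
-- def get_one_number(lst):
--     if len(lst) == 1:
--         return lst[0]
--     num = get_one_number(lst[1:])
--     lenght = 0
--     n = num
--     while n != 0:
--         lenght += 1
--         n = n // 10
--
--     return lst[0] * (10 ** lenght) + num
-- ===== SOURCE B (Python) =====
-- def get_one_number(lst):
--     # One right-to-left pass: keep the value built so far and its digit length;
--     # no slicing, no recursion, and the digit count is taken per element, not
--     # re-counted on the growing accumulated number.
--     acc = 0
--     length = 0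
--     for x in reversed(lst[1:]):
--         acc += x * 10 ** length
--         while x > 0:
--             length += 1
--             x //= 10
--     return lst[0] * 10 ** length + acc
-- ===== Notes on version B (the rewrite author's own statement) =====
-- stated objective: alternative
-- what changed: Replaces the recursion with per-level list slicing and a digit-count loop over the ever-growing accumulated number by a single iterative right-to-left pass that keeps the value and its digit length, counting digits only of each element (intended as faster; a timing run could not measure a ratio because A hits the recursion limit / times out on the larger generated inputs).
-- outside the precondition, e.g. on get_one_number([]): A raises RecursionError, B raises IndexError
import Mathlib
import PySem

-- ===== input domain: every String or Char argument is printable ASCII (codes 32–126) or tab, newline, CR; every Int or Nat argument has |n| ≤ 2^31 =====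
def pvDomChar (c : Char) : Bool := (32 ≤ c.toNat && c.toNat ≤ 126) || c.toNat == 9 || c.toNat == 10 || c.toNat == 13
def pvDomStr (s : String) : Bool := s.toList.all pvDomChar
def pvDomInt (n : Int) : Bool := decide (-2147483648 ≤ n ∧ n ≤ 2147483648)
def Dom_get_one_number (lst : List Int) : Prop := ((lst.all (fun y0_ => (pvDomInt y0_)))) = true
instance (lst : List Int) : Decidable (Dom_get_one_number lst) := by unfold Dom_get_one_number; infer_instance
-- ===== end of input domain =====

-- B changes the algorithm: one right-to-left pass tracking (value, digit length) instead of
-- recursion with slicing and a digit loop on the growing number.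

-- ===== PORT A =====
-- the 'while n != 0: lenght += 1; n = n // 10' loop; fuel only makes it total (enough fuel is
-- supplied at the call site for every num ≥ 0; for num < 0 Python diverges, excluded by Pre_)
def aLenLoop (fuel : Nat) (n : Int) : Nat :=
  match fuel with
  | 0 => 0
  | f + 1 => if n ≠ 0 then aLenLoop f (PySem.Int.floordiv n 10) + 1 else 0

def get_one_number (lst : List Int) : Int :=
  match lst with
  | [] => 0            -- Python: unbounded recursion (RecursionError); excluded by Pre_
  | [x] => x
  | x :: rest =>
    let num := get_one_number rest
    x * 10 ^ (aLenLoop (num.natAbs + 1) num) + num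

-- ===== PORT B =====
-- the 'while x > 0: length += 1; x //= 10' loop of Source B
def bDigits (x : Int) : Nat :=
  if h : 0 < x then bDigits (PySem.Int.floordiv x 10) + 1 else 0
termination_by x.toNat
decreasing_by
  rw [PySem.Int.floordiv_eq_ediv_of_pos (by norm_num)]
  omega

def get_one_number_alt (lst : List Int) : Int :=
  let s := (PySem.List.slice lst (some 1) none).reverse.foldl
    (fun (s : Int × Nat) x => (s.1 + x * 10 ^ s.2, s.2 + bDigits x)) (0, 0)
  (PySem.List.pyGet? lst 0).getD 0 * 10 ^ s.2 + s.1

-- ===== PRECONDITION & SPEC =====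
-- Pre_ excludes exactly the inputs where A never returns: the empty list (RecursionError) and
-- lists with a negative element after the head (the digit-count while-loop never terminates
-- on a negative number); B raises IndexError on [] and returns a value on negative tails.
def Pre_get_one_number (lst : List Int) : Prop := lst ≠ [] ∧ ∀ x ∈ lst.tail, 0 ≤ x
instance (lst : List Int) : Decidable (Pre_get_one_number lst) := by
  unfold Pre_get_one_number; infer_instance

def pvWitness_get_one_number : List Int := [1, 0, 34]

def Spec_get_one_number (lst : List Int) (out : Int) : Prop := out = get_one_number_alt lst
instance (lst : List Int) (out : Int) : Decidable (Spec_get_one_number lst out) := by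
  unfold Spec_get_one_number; infer_instance

-- ===== CLAIM (what is proved, stated in full; the proofs are below) =====
def Claim_equal_get_one_number : Prop := ∀ (lst : List Int), Dom_get_one_number lst → Pre_get_one_number lst → Spec_get_one_number lst (get_one_number lst)

-- ===== LEMMAS AND PROOFS =====

theorem bDigits_zero_of_nonpos {x : Int} (h : ¬ 0 < x) : bDigits x = 0 := by
  rw [bDigits]; simp [h]

theorem bDigits_pos_step {x : Int} (h : 0 < x) :
    bDigits x = bDigits (x / 10) + 1 := by
  rw [bDigits]
  rw [PySem.Int.floordiv_eq_ediv_of_pos (by norm_num)]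
  simp [h]

theorem lt_pow_bDigits (n : Int) (hn : 0 ≤ n) : n < 10 ^ bDigits n := by
  by_cases h : 0 < n
  · rw [bDigits_pos_step h]
    have ih : n / 10 < 10 ^ bDigits (n / 10) :=
      lt_pow_bDigits (n / 10) (by omega)
    have := Int.ediv_add_emod n 10
    have hm : 0 ≤ n % 10 := Int.emod_nonneg n (by norm_num)
    have hm' : n % 10 < 10 := Int.emod_lt_of_pos n (by norm_num)
    calc n = 10 * (n / 10) + n % 10 := by omega
    _ < 10 * (10 ^ bDigits (n / 10)) := by omega
    _ = 10 ^ (bDigits (n / 10) + 1) := by ring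
  · rw [bDigits_zero_of_nonpos h]; omega
termination_by n.toNat
decreasing_by omega

theorem bDigits_mul_pow_add (x v : Int) (L : Nat) (hx : 0 < x) (hv : 0 ≤ v)
    (hvL : v < 10 ^ L) : bDigits (x * 10 ^ L + v) = bDigits x + L := by
  induction L generalizing v with
  | zero =>
    have : v = 0 := by omega
    simp [this]
  | succ L ih =>
    have hval : 0 < x * 10 ^ (L+1) + v := by
      have : (0:Int) < x * 10 ^ (L+1) := by positivity
      omega
    rw [bDigits_pos_step hval]
    have hdiv : (x * 10 ^ (L+1) + v) / 10 = x * 10 ^ L + v / 10 := by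
      have h1 : x * 10 ^ (L+1) + v = v + (x * 10 ^ L) * 10 := by ring
      rw [h1, Int.add_mul_ediv_right v (x * 10 ^ L) (by norm_num : (10:Int) ≠ 0)]
      ring
    have hv10nonneg : 0 ≤ v / 10 := Int.ediv_nonneg hv (by norm_num)
    have hv10 : v / 10 < 10 ^ L := by
      have := Int.ediv_add_emod v 10
      have hm : 0 ≤ v % 10 := Int.emod_nonneg v (by norm_num)
      have hL1 : (10:Int) ^ (L+1) = 10 * 10 ^ L := by ring
      omega
    rw [hdiv, ih (v / 10) hv10nonneg hv10]
    omega

theorem aLenLoop_eq_bDigits (f : Nat) (n : Int) (hn : 0 ≤ n) (hf : n.toNat < f) :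
    aLenLoop f n = bDigits n := by
  induction f generalizing n with
  | zero => omega
  | succ f ih =>
    by_cases h : n = 0
    · simp [aLenLoop, h, bDigits_zero_of_nonpos]
    · have hp : 0 < n := by omega
      rw [aLenLoop]
      rw [if_pos h, PySem.Int.floordiv_eq_ediv_of_pos (by norm_num),
        bDigits_pos_step hp, ih (n / 10) (by omega) (by omega)]

theorem get_one_number_nonneg (lst : List Int) (h : ∀ x ∈ lst, 0 ≤ x) :
    0 ≤ get_one_number lst := by
  match lst with
  | [] => simp [get_one_number]
  | [x] => simpa [get_one_number] using h x (by simp)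
  | x :: y :: rest =>
    have ih : 0 ≤ get_one_number (y :: rest) :=
      get_one_number_nonneg (y :: rest) (fun z hz => h z (by simp_all))
    have hx : 0 ≤ x := h x (by simp)
    show 0 ≤ x * 10 ^ _ + get_one_number (y :: rest)
    have : (0:Int) ≤ x * 10 ^ (aLenLoop ((get_one_number (y :: rest)).natAbs + 1)
        (get_one_number (y :: rest))) := by positivity
    omega

-- fold invariant: over a nonneg list (processed in reverse) the state is
-- (A's value of that list, the digit length of that value)
theorem fold_invariant (rest : List Int) (h : ∀ x ∈ rest, 0 ≤ x) :
    rest.reverse.foldl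
      (fun (s : Int × Nat) x => (s.1 + x * 10 ^ s.2, s.2 + bDigits x)) (0, 0)
    = (get_one_number rest, bDigits (get_one_number rest)) := by
  match rest with
  | [] => simp [get_one_number, bDigits_zero_of_nonpos]
  | [x] =>
    simp [get_one_number, List.foldl]
  | x :: y :: t =>
    have htail : ∀ z ∈ y :: t, 0 ≤ z := fun z hz => h z (by simp_all)
    have ih := fold_invariant (y :: t) htail
    have hx : 0 ≤ x := h x (by simp)
    set v := get_one_number (y :: t) with hv
    have hv0 : 0 ≤ v := get_one_number_nonneg _ htail
    have hvlt : v < 10 ^ bDigits v := lt_pow_bDigits v hv0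
    have hrev : (x :: y :: t).reverse = (y :: t).reverse ++ [x] := by simp
    rw [hrev, List.foldl_append, ih]
    have hA : get_one_number (x :: y :: t)
        = x * 10 ^ (aLenLoop (v.natAbs + 1) v) + v := rfl
    have hlen : aLenLoop (v.natAbs + 1) v = bDigits v :=
      aLenLoop_eq_bDigits _ v hv0 (by omega)
    rw [hA, hlen]
    by_cases hxp : 0 < x
    · have := bDigits_mul_pow_add x v (bDigits v) hxp hv0 hvlt
      simp [List.foldl, this]
      constructor
      · ring
      · omega
    · have hx0 : x = 0 := by omega
      simp [List.foldl, hx0, bDigits_zero_of_nonpos]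

theorem slice_one (lst : List Int) :
    PySem.List.slice lst (some 1) none = lst.drop 1 := by
  have := PySem.List.slice_from_natCast (xs := lst) (a := 1)
  simpa using this

-- ===== VERDICT (by name: the statement is the Claim_ definition above) =====
theorem get_one_number_spec : Claim_equal_get_one_number := by
  intro lst _ hpre
  obtain ⟨hne, htail⟩ := hpre
  unfold Spec_get_one_number get_one_number_alt
  match lst with
  | [] => exact absurd rfl hne
  | x :: rest =>
    have htail' : ∀ z ∈ rest, 0 ≤ z := by simpa using htail
    rw [slice_one]
    simp only [List.drop_one, List.tail_cons, PySem.List.pyGet?_zero_cons, Option.getD_some]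
    rw [fold_invariant rest htail']
    match rest with
    | [] => simp [get_one_number, bDigits_zero_of_nonpos]
    | y :: t =>
      have hv0 : 0 ≤ get_one_number (y :: t) := get_one_number_nonneg _ htail'
      have hA : get_one_number (x :: y :: t)
          = x * 10 ^ (aLenLoop ((get_one_number (y :: t)).natAbs + 1)
              (get_one_number (y :: t))) + get_one_number (y :: t) := rfl
      rw [hA, aLenLoop_eq_bDigits _ _ hv0 (by omega)]
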